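-- pv_equiv track=rewrite | github.com/kotahorii/python_algorithm | snake.py | snake_string_v1
-- ===== SOURCE A (Python) =====
-- def snake_string_v1(chars: str) -> list[list[str]]:
--     result: list[list[str]] = [[], [], []]
--     result_indexes = {0, 1, 2}
--     insert_index = 1
--     for i, s in enumerate(chars):
--         if i % 4 == 1:
--             insert_index = 0
--         elif i % 2 == 0:
--             insert_index = 1
--         elif i % 4 == 3:
--             insert_index = 2
--         result[insert_index].append(s)
--         for rest_index in result_indexes - {insert_index}:
--             result[rest_index].append(" ")
--     return result
-- ===== SOURCE B (Python) =====
-- def snake_string_v1(chars: str) -> list[list[str]]: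
--     pattern = [1, 0, 1, 2]
--     return [
--         [c if pattern[i % 4] == r else " " for i, c in enumerate(chars)]
--         for r in (0, 1, 2)
--     ]
-- ===== Notes on version B (the rewrite author's own statement) =====
-- stated objective: simpler
-- what changed: Replaced the single simultaneous pass (mutable insert_index state plus a set-difference loop to pad the other rows) with a precomputed cycle table [1,0,1,2] and three independent per-row comprehensions over the string.
import Mathlib
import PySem

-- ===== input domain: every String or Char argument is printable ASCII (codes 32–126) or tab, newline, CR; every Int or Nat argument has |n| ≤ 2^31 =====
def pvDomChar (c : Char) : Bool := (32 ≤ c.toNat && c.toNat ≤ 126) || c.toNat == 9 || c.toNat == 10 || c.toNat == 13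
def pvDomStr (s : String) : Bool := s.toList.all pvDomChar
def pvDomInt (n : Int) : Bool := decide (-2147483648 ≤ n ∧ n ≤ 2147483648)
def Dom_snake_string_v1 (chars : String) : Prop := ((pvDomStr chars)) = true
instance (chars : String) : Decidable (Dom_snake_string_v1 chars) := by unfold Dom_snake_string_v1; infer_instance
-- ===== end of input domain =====

-- B replaces A's single simultaneous pass (mutable insert_index + set-difference padding loop)
-- with a precomputed cycle table [1,0,1,2] and three independent per-row scans (objective: simpler).

-- ===== PORT A =====
-- Loop body of A: the insert_index if/elif chain (carrying the previous value in st.2, as Python does),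
-- result[insert_index].append(s), then a ' ' appended to each row of {0,1,2} - {insert_index}
-- (Python iterates that small-int set difference in ascending order, which Set.diff preserves here).
-- insert_index is always 0, 1 or 2 (nonnegative, in range for the 3-row list), so
-- List.modify idx.toNat (· ++ [·]) is exactly Python's result[idx].append(·).
def pvStepA (st : List (List String) × Int) (p : Int × Char) : List (List String) × Int :=
  let insert_index : Int :=
    if PySem.Int.mod p.1 4 == 1 then 0
    else if PySem.Int.mod p.1 2 == 0 then 1
    else if PySem.Int.mod p.1 4 == 3 then 2
    else st.2
  let result := st.1.modify insert_index.toNat (· ++ [String.ofList [p.2]])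
  let result := (PySem.Set.diff (PySem.Set.ofList [(0 : Int), 1, 2]) [insert_index]).foldl
      (fun r j => r.modify j.toNat (· ++ [" "])) result
  (result, insert_index)

def snake_string_v1 (chars : String) : List (List String) :=
  let result : List (List String) := [[], [], []]
  ((PySem.List.enumerate chars.toList 0).foldl pvStepA (result, 1)).1

-- ===== PORT B =====
def pvPattern : List Int := [1, 0, 1, 2]

def snake_string_v1_alt (chars : String) : List (List String) :=
  [(0 : Int), 1, 2].map (fun r =>
    (PySem.List.enumerate chars.toList 0).map (fun p =>
      if PySem.List.pyGetD pvPattern (PySem.Int.mod p.1 4) 0 == r then String.ofList [p.2] else " "))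

-- ===== PRECONDITION & SPEC =====
def Spec_snake_string_v1 (chars : String) (out : List (List String)) : Prop := out = snake_string_v1_alt chars
instance (chars : String) (out : List (List String)) : Decidable (Spec_snake_string_v1 chars out) := by unfold Spec_snake_string_v1; infer_instance

-- ===== CLAIM (what is proved, stated in full; the proofs are below) =====
def Claim_equal_snake_string_v1 : Prop := ∀ (chars : String), Dom_snake_string_v1 chars → Spec_snake_string_v1 chars (snake_string_v1 chars)

-- ===== LEMMAS AND PROOFS =====

-- row r of B, over a suffix of the char list whose first index is n
def pvRow (r : Int) (l : List Char) (n : Int) : List String :=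
  (PySem.List.enumerate l n).map (fun p =>
    if PySem.List.pyGetD pvPattern (PySem.Int.mod p.1 4) 0 == r then String.ofList [p.2] else " ")

lemma pvRow_nil (r : Int) (n : Int) : pvRow r [] n = [] := by
  simp [pvRow, PySem.List.enumerate_nil]

lemma pvRow_cons (r : Int) (x : Char) (l : List Char) (n : Int) :
    pvRow r (x :: l) n =
      (if PySem.List.pyGetD pvPattern (PySem.Int.mod n 4) 0 == r then String.ofList [x] else " ")
        :: pvRow r l (n + 1) := by
  simp [pvRow, PySem.List.enumerate_cons]

-- one iteration of A's loop = the corresponding entry of each of B's three rows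
lemma pvStep_eq (n : Nat) (x : Char) (a b c : List String) (k : Int) :
    pvStepA ([a, b, c], k) ((n : Int), x) =
      ([a ++ [if PySem.List.pyGetD pvPattern ((n % 4 : Nat) : Int) 0 == (0 : Int) then String.ofList [x] else " "],
        b ++ [if PySem.List.pyGetD pvPattern ((n % 4 : Nat) : Int) 0 == (1 : Int) then String.ofList [x] else " "],
        c ++ [if PySem.List.pyGetD pvPattern ((n % 4 : Nat) : Int) 0 == (2 : Int) then String.ofList [x] else " "]],
        PySem.List.pyGetD pvPattern ((n % 4 : Nat) : Int) 0) := by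
  have hm4 : PySem.Int.mod (n : Int) 4 = ((n % 4 : Nat) : Int) := by
    rw [PySem.Int.mod_eq_emod_of_pos (by omega)]; omega
  have hm2 : PySem.Int.mod (n : Int) 2 = ((n % 4 % 2 : Nat) : Int) := by
    rw [PySem.Int.mod_eq_emod_of_pos (by omega)]; omega
  have h4 : n % 4 = 0 ∨ n % 4 = 1 ∨ n % 4 = 2 ∨ n % 4 = 3 := by omega
  unfold pvStepA
  simp only [hm4, hm2]
  rcases h4 with h | h | h | h <;>
    simp [h, pvPattern, PySem.Set.diff, PySem.Set.ofList, PySem.Set.contains, List.modify,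
      PySem.List.pyGetD, PySem.List.pyGet?, PySem.List.pyIdx?]

-- A's loop over a suffix appends B's three rows to the accumulated rows, whatever insert_index carries
lemma pvLoopA (l : List Char) : ∀ (n : Nat) (a b c : List String) (k : Int),
    ((PySem.List.enumerate l (n : Int)).foldl pvStepA ([a, b, c], k)).1
      = [a ++ pvRow 0 l n, b ++ pvRow 1 l n, c ++ pvRow 2 l n] := by
  induction l with
  | nil => intro n a b c k; simp only [PySem.List.enumerate_nil, List.foldl_nil, pvRow_nil, List.append_nil]
  | cons x l ih =>
    intro n a b c k
    rw [PySem.List.enumerate_cons, List.foldl_cons, pvStep_eq]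
    have hcast : (n : Int) + 1 = ((n + 1 : Nat) : Int) := by push_cast; ring
    rw [hcast, ih (n + 1)]
    have hm4 : PySem.Int.mod (n : Int) 4 = ((n % 4 : Nat) : Int) := by
      rw [PySem.Int.mod_eq_emod_of_pos (by omega)]; omega
    simp only [pvRow_cons, hm4, hcast, List.append_assoc, List.singleton_append]

theorem snake_string_v1_spec_aux (chars : String) :
    snake_string_v1 chars = snake_string_v1_alt chars := by
  unfold snake_string_v1 snake_string_v1_alt
  have := pvLoopA chars.toList 0 [] [] [] 1
  simp only [Nat.cast_zero] at this
  rw [this]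
  simp [pvRow, List.map]

-- ===== VERDICT (by name: the statement is the Claim_ definition above) =====
theorem snake_string_v1_spec : Claim_equal_snake_string_v1 := by
  intro chars _
  exact snake_string_v1_spec_aux chars
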